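-- pv_equiv track=rewrite | github.com/MAGLeb/current_practice | algorithms_yandex/fifthSprint/secondWeek/E.py | solution_old
-- ===== SOURCE A (Python) =====
-- def solution_old(array):
--   max_result = 0
--
--   for i in range(len(array)):
--     inter_result = 0
--     counter = 0
--     if max_result > len(array) - i:
--       break
--     for item in array[i:]:
--       if item == '1':
--         inter_result += 1
--       else:
--         inter_result -= 1
--       counter += 1
--
--       if inter_result == 0:
--         if counter > max_result:
--           max_result = counter
--
--   return max_result
-- ===== SOURCE B (Python) =====
-- def solution_old(array):
--   first = {0: 0}
--   balance = 0
--   best = 0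
--   for j, item in enumerate(array, 1):
--     balance += 1 if item == '1' else -1
--     if balance in first:
--       length = j - first[balance]
--       if length > best:
--         best = length
--     else:
--       first[balance] = j
--   return best
-- ===== Notes on version B (the rewrite author's own statement) =====
-- stated objective: faster
-- what changed: Replaced the quadratic restart-at-every-index double scan with a single pass that tracks the running balance and a hashmap of each balance's first occurrence, so the longest zero-balance window ending at each position is found in O(1).
import Mathlib
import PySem

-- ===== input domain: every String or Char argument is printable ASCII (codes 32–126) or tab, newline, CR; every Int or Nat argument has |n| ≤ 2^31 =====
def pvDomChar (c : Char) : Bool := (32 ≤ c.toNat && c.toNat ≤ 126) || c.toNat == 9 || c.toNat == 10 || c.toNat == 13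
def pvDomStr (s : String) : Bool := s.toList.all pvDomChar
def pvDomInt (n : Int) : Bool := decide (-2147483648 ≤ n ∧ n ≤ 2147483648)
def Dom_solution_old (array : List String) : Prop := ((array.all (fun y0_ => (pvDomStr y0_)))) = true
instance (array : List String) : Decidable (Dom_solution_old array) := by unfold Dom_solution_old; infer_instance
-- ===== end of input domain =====

-- B replaces A's quadratic restart-at-every-index double scan with one prefix-balance pass
-- and a first-occurrence hashmap (objective: faster, asymptotic O(n^2) → O(n)).

-- ===== PORT A =====
-- inner 'for item in array[i:]' loop: state (inter_result, counter, max_result)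
def pvAInner : List String → Int → Int → Int → Int
  | [], _, _, maxr => maxr
  | item :: rest, inter, counter, maxr =>
    let inter' := if item = "1" then inter + 1 else inter - 1
    let counter' := counter + 1
    let maxr' := if inter' = 0 ∧ counter' > maxr then counter' else maxr
    pvAInner rest inter' counter' maxr'

-- outer 'for i in range(len(array))' loop with the break condition at the top of the body
def pvALoop (array : List String) (i : Nat) (maxr : Int) : Int :=
  if i < array.length then
    if maxr > (array.length : Int) - (i : Int) then maxr
    else pvALoop array (i + 1) (pvAInner (array.drop i) 0 0 maxr)
  else maxr
termination_by array.length - i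

def solution_old (array : List String) : Int := pvALoop array 0 0

-- ===== PORT B =====
-- one pass: j is the 1-based position, `first` maps each seen prefix balance to its first position
def pvBLoop : List String → Int → PySem.Dict Int Int → Int → Int → Int
  | [], _, _, _, best => best
  | item :: rest, j, first, balance, best =>
    let balance' := balance + (if item = "1" then 1 else -1)
    match first.get? balance' with
    | some i =>
      let len := j - i
      pvBLoop rest (j + 1) first balance' (if len > best then len else best)
    | none => pvBLoop rest (j + 1) (first.insert balance' j) balance' best

def solution_old_alt (array : List String) : Int :=
  pvBLoop array 1 (PySem.Dict.ofList [((0 : Int), (0 : Int))]) 0 0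

-- ===== PRECONDITION & SPEC =====
def Spec_solution_old (array : List String) (out : Int) : Prop := out = solution_old_alt array
instance (array : List String) (out : Int) : Decidable (Spec_solution_old array out) := by unfold Spec_solution_old; infer_instance

-- ===== CLAIM (what is proved, stated in full; the proofs are below) =====
def Claim_equal_solution_old : Prop := ∀ (array : List String), Dom_solution_old array → Spec_solution_old array (solution_old array)

-- ===== LEMMAS AND PROOFS =====

-- weight of one element and prefix balance of the first k elements
def pvW (s : String) : Int := if s = "1" then 1 else -1

def pvBal (array : List String) (k : Nat) : Int := ((array.take k).map pvW).sum

-- pairs i ≤ p.1 ≤ p.2 ≤ n with equal balance: what A still has to examine from start index i on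
def pvGset (array : List String) (i : Nat) : Finset (Nat × Nat) :=
  (Finset.range (array.length + 1) ×ˢ Finset.range (array.length + 1)).filter
    (fun p => i ≤ p.1 ∧ p.1 ≤ p.2 ∧ pvBal array p.1 = pvBal array p.2)

def pvG (array : List String) (i : Nat) : Nat := (pvGset array i).sup (fun p => p.2 - p.1)

-- end positions k ∈ (m, n] whose balance equals the balance at i
def pvHset (array : List String) (i m : Nat) : Finset Nat :=
  (Finset.Icc (m + 1) array.length).filter (fun k => pvBal array k = pvBal array i)

def pvH (array : List String) (i m : Nat) : Nat := (pvHset array i m).sup (fun k => k - i)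

-- pairs p.1 ≤ p.2 ≤ m with equal balance: what B has seen after m elements
def pvBset (array : List String) (m : Nat) : Finset (Nat × Nat) :=
  (Finset.range (m + 1) ×ˢ Finset.range (m + 1)).filter
    (fun p => p.1 ≤ p.2 ∧ pvBal array p.1 = pvBal array p.2)

def pvB (array : List String) (m : Nat) : Nat := (pvBset array m).sup (fun p => p.2 - p.1)

def pvFirstOcc? (array : List String) (m : Nat) (b : Int) : Option Nat :=
  (List.range (m + 1)).find? (fun k => pvBal array k = b)

def pvDictInv (array : List String) (m : Nat) (d : PySem.Dict Int Int) : Prop :=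
  ∀ b : Int, d.get? b = (pvFirstOcc? array m b).map (fun k => (k : Int))

lemma pvBal_succ (array : List String) (m : Nat) (h : m < array.length) :
    pvBal array (m + 1) = pvBal array m + pvW array[m] := by
  unfold pvBal
  have h' : m < (array.map pvW).length := by simpa using h
  have := List.sum_take_succ (array.map pvW) m h'
  simpa [List.map_take] using this

lemma pvMem_Gset (array : List String) (i : Nat) (p : Nat × Nat) :
    p ∈ pvGset array i ↔ p.1 ≤ array.length ∧ p.2 ≤ array.length ∧ i ≤ p.1 ∧ p.1 ≤ p.2 ∧
      pvBal array p.1 = pvBal array p.2 := by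
  simp [pvGset, Finset.mem_filter, Finset.mem_product]
  tauto

lemma pvMem_Hset (array : List String) (i m k : Nat) :
    k ∈ pvHset array i m ↔ m + 1 ≤ k ∧ k ≤ array.length ∧ pvBal array k = pvBal array i := by
  simp [pvHset, Finset.mem_filter, Finset.mem_Icc]
  tauto

lemma pvMem_Bset (array : List String) (m : Nat) (p : Nat × Nat) :
    p ∈ pvBset array m ↔ p.1 ≤ m ∧ p.2 ≤ m ∧ p.1 ≤ p.2 ∧ pvBal array p.1 = pvBal array p.2 := by
  simp [pvBset, Finset.mem_filter, Finset.mem_product]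
  tauto

lemma pvH_terminal (array : List String) (i m : Nat) (h : array.length ≤ m) :
    pvH array i m = 0 := by
  apply Nat.le_zero.mp
  apply Finset.sup_le
  intro k hk
  rw [pvMem_Hset] at hk
  omega

lemma pvH_split (array : List String) (i m : Nat) (hm : m < array.length) :
    pvH array i m
      = max (if pvBal array (m + 1) = pvBal array i then m + 1 - i else 0) (pvH array i (m + 1)) := by
  apply le_antisymm
  · apply Finset.sup_le
    intro k hk
    rw [pvMem_Hset] at hk
    by_cases hk1 : k = m + 1
    · refine le_trans ?_ (le_max_left _ _)
      subst hk1
      rw [if_pos hk.2.2]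
    · refine le_trans ?_ (le_max_right _ _)
      apply Finset.le_sup (f := fun k => k - i)
      rw [pvMem_Hset]
      exact ⟨by omega, hk.2.1, hk.2.2⟩
  · apply max_le
    · by_cases hb : pvBal array (m + 1) = pvBal array i
      · rw [if_pos hb]
        apply Finset.le_sup (f := fun k => k - i) (b := m + 1)
        rw [pvMem_Hset]
        exact ⟨le_rfl, by omega, hb⟩
      · simp [hb]
    · apply Finset.sup_le
      intro k hk
      rw [pvMem_Hset] at hk
      apply Finset.le_sup (f := fun k => k - i)
      rw [pvMem_Hset]
      exact ⟨by omega, hk.2.1, hk.2.2⟩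

-- the inner loop computes the best length among windows [i, k] with k beyond m
lemma pvAInner_eq (array : List String) (i : Nat) :
    ∀ (l : List String) (m : Nat) (maxr : Int), l = array.drop m → i ≤ m → 0 ≤ maxr →
      pvAInner l (pvBal array m - pvBal array i) ((m : Int) - (i : Int)) maxr
        = max maxr ((pvH array i m : Nat) : Int) := by
  intro l
  induction l with
  | nil =>
    intro m maxr hl him h0
    have hlen : array.length ≤ m := by
      by_contra hc
      have := List.drop_eq_nil_iff.mp hl.symm
      omega
    rw [pvH_terminal array i m hlen]
    simp [pvAInner, max_eq_left h0]
  | cons item rest ih =>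
    intro m maxr hl him h0
    have hm : m < array.length := by
      by_contra hc
      rw [List.drop_eq_nil_of_le (by omega)] at hl
      simp at hl
    have hd : array.drop m = array[m] :: array.drop (m + 1) := (List.getElem_cons_drop hm).symm
    rw [hd] at hl
    obtain ⟨hitem, hrest⟩ : item = array[m] ∧ rest = array.drop (m + 1) := by
      injection hl with a b; exact ⟨a, b⟩
    simp only [pvAInner]
    have hinter : (if item = "1" then pvBal array m - pvBal array i + 1
        else pvBal array m - pvBal array i - 1) = pvBal array (m + 1) - pvBal array i := by
      rw [pvBal_succ array m hm, ← hitem]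
      unfold pvW
      split_ifs <;> ring
    have hcounter : (m : Int) - (i : Int) + 1 = ((m + 1 : Nat) : Int) - (i : Int) := by
      push_cast; ring
    rw [hinter, hcounter]
    have hmaxr' : (if pvBal array (m + 1) - pvBal array i = 0 ∧
          ((m + 1 : Nat) : Int) - (i : Int) > maxr then ((m + 1 : Nat) : Int) - (i : Int) else maxr)
        = max maxr (if pvBal array (m + 1) = pvBal array i then ((m + 1 : Nat) : Int) - (i : Int) else 0) := by
      by_cases hb : pvBal array (m + 1) = pvBal array i
      · simp only [hb, sub_self, true_and]
        split_ifs with hgt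
        · rw [max_eq_right (le_of_lt hgt)]
        · rw [max_eq_left (by omega)]
      · have : ¬ (pvBal array (m + 1) - pvBal array i = 0) := fun hc => hb (by omega)
        simp only [if_neg hb, max_eq_left h0]
        split_ifs with hgt
        · exact absurd hgt.1 this
        · rfl
    rw [hmaxr']
    have h0' : 0 ≤ max maxr (if pvBal array (m + 1) = pvBal array i then ((m + 1 : Nat) : Int) - (i : Int) else 0) :=
      le_trans h0 (le_max_left _ _)
    rw [ih (m + 1) _ hrest (by omega) h0']
    rw [pvH_split array i m hm]
    have hcast : ((max (if pvBal array (m + 1) = pvBal array i then m + 1 - i else 0) (pvH array i (m + 1)) : Nat) : Int)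
        = max (if pvBal array (m + 1) = pvBal array i then ((m + 1 : Nat) : Int) - (i : Int) else 0)
            ((pvH array i (m + 1) : Nat) : Int) := by
      rw [Nat.cast_max]
      congr 1
      split_ifs
      · push_cast; omega
      · rfl
    rw [hcast, max_assoc]

lemma pvGset_anti (array : List String) (i : Nat) : pvGset array (i + 1) ⊆ pvGset array i := by
  intro p hp
  rw [pvMem_Gset] at hp ⊢
  exact ⟨hp.1, hp.2.1, by omega, hp.2.2.2.1, hp.2.2.2.2⟩

lemma pvG_split (array : List String) (i : Nat) (h : i < array.length) :
    pvG array i = max (pvH array i i) (pvG array (i + 1)) := by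
  apply le_antisymm
  · apply Finset.sup_le
    intro p hp
    rw [pvMem_Gset] at hp
    obtain ⟨h1, h2, h3, h4, h5⟩ := hp
    by_cases hpi : p.1 = i
    · by_cases hqi : p.2 = i
      · simp [hpi, hqi]
      · refine le_trans ?_ (le_max_left _ _)
        have hmem : p.2 ∈ pvHset array i i := by
          rw [pvMem_Hset]
          exact ⟨by omega, h2, by rw [← hpi, h5]⟩
        have := Finset.le_sup (f := fun k => k - i) hmem
        simpa [hpi] using this
    · refine le_trans ?_ (le_max_right _ _)
      apply Finset.le_sup (f := fun p : Nat × Nat => p.2 - p.1)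
      rw [pvMem_Gset]
      exact ⟨h1, h2, by omega, h4, h5⟩
  · apply max_le
    · apply Finset.sup_le
      intro k hk
      rw [pvMem_Hset] at hk
      have hmem : (i, k) ∈ pvGset array i := by
        rw [pvMem_Gset]
        exact ⟨by omega, hk.2.1, le_rfl, by omega, hk.2.2.symm⟩
      exact Finset.le_sup (f := fun p : Nat × Nat => p.2 - p.1) hmem
    · exact Finset.sup_mono (pvGset_anti array i)

lemma pvG_terminal (array : List String) (i : Nat) (h : array.length ≤ i) :
    pvG array i = 0 := by
  apply Nat.le_zero.mp
  apply Finset.sup_le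
  intro p hp
  rw [pvMem_Gset] at hp
  omega

lemma pvG_le (array : List String) (i : Nat) : pvG array i ≤ array.length - i := by
  apply Finset.sup_le
  intro p hp
  rw [pvMem_Gset] at hp
  omega

lemma pvALoop_eq (array : List String) :
    ∀ (fuel i : Nat) (maxr : Int), array.length - i ≤ fuel → 0 ≤ maxr →
      pvALoop array i maxr = max maxr ((pvG array i : Nat) : Int) := by
  intro fuel
  induction fuel with
  | zero =>
    intro i maxr hfuel h0
    have hi : ¬ i < array.length := by omega
    rw [pvALoop, if_neg hi, pvG_terminal array i (by omega)]
    simp [max_eq_left h0]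
  | succ fuel ih =>
    intro i maxr hfuel h0
    by_cases hi : i < array.length
    · by_cases hbr : maxr > (array.length : Int) - (i : Int)
      · rw [pvALoop, if_pos hi, if_pos hbr]
        have hle : ((pvG array i : Nat) : Int) ≤ maxr := by
          have h1 : pvG array i ≤ array.length - i := pvG_le array i
          have h2 : ((array.length - i : Nat) : Int) = (array.length : Int) - (i : Int) := by omega
          calc ((pvG array i : Nat) : Int) ≤ ((array.length - i : Nat) : Int) := by exact_mod_cast h1
            _ ≤ maxr := by omega
        rw [max_eq_left hle]
      · have hinner := pvAInner_eq array i (array.drop i) i maxr rfl le_rfl h0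
        simp only [sub_self] at hinner
        rw [pvALoop, if_pos hi, if_neg hbr, hinner,
            ih (i + 1) _ (by omega) (le_trans h0 (le_max_left _ _)),
            pvG_split array i hi, Nat.cast_max, max_assoc]
    · rw [pvALoop, if_neg hi, pvG_terminal array i (by omega)]
      simp [max_eq_left h0]

lemma pvFirstOcc?_succ (array : List String) (m : Nat) (b : Int) :
    pvFirstOcc? array (m + 1) b
      = (pvFirstOcc? array m b).or (if pvBal array (m + 1) = b then some (m + 1) else none) := by
  unfold pvFirstOcc?
  rw [show m + 1 + 1 = (m + 1) + 1 from rfl, List.range_succ, List.find?_append]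
  congr 1
  by_cases hb : pvBal array (m + 1) = b <;> simp [List.find?, hb]

lemma pvBset_mono (array : List String) (m : Nat) : pvBset array m ⊆ pvBset array (m + 1) := by
  intro p hp
  rw [pvMem_Bset] at hp ⊢
  exact ⟨by omega, by omega, hp.2.2.1, hp.2.2.2⟩

lemma pvFirstOcc?_some (array : List String) (m : Nat) (b : Int) (k : Nat)
    (hf : pvFirstOcc? array m b = some k) :
    pvBal array k = b ∧ k ≤ m ∧ ∀ j, j < k → pvBal array j ≠ b := by
  rw [pvFirstOcc?, List.find?_eq_some_iff_getElem] at hf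
  obtain ⟨hpk, i, hi, hget, hmin⟩ := hf
  simp only [List.getElem_range] at hget
  subst hget
  simp only [List.length_range] at hi
  refine ⟨by simpa using hpk, by omega, ?_⟩
  intro j hj hbal
  have := hmin j hj
  simp only [List.getElem_range] at this
  simp [hbal] at this

lemma pvB_step_some (array : List String) (m k : Nat)
    (hf : pvFirstOcc? array m (pvBal array (m + 1)) = some k) :
    pvB array (m + 1) = max (pvB array m) (m + 1 - k) := by
  obtain ⟨hbal, hkm, hmin⟩ := pvFirstOcc?_some array m _ k hf
  apply le_antisymm
  · apply Finset.sup_le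
    intro p hp
    rw [pvMem_Bset] at hp
    obtain ⟨h1, h2, h3, h4⟩ := hp
    by_cases hq : p.2 ≤ m
    · refine le_trans ?_ (le_max_left _ _)
      apply Finset.le_sup (f := fun p : Nat × Nat => p.2 - p.1)
      rw [pvMem_Bset]
      exact ⟨by omega, hq, h3, h4⟩
    · have hq2 : p.2 = m + 1 := by omega
      by_cases hp1 : p.1 = m + 1
      · simp [hp1, hq2]
      · have hp1m : p.1 ≤ m := by omega
        have hk1 : k ≤ p.1 := by
          by_contra hlt
          exact hmin p.1 (by omega) (hq2 ▸ h4)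
        refine le_trans ?_ (le_max_right _ _)
        omega
  · apply max_le
    · exact Finset.sup_mono (pvBset_mono array m)
    · apply Finset.le_sup (f := fun p : Nat × Nat => p.2 - p.1) (b := (k, m + 1))
      rw [pvMem_Bset]
      exact ⟨by omega, by omega, by omega, hbal⟩

lemma pvFirstOcc?_none (array : List String) (m : Nat) (b : Int)
    (hf : pvFirstOcc? array m b = none) :
    ∀ k, k ≤ m → pvBal array k ≠ b := by
  intro k hk hbal
  rw [pvFirstOcc?, List.find?_eq_none] at hf
  have hmem : k ∈ List.range (m + 1) := by rw [List.mem_range]; omega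
  have := hf k hmem
  simp [hbal] at this

lemma pvB_step_none (array : List String) (m : Nat)
    (hf : pvFirstOcc? array m (pvBal array (m + 1)) = none) :
    pvB array (m + 1) = pvB array m := by
  apply le_antisymm
  · apply Finset.sup_le
    intro p hp
    rw [pvMem_Bset] at hp
    obtain ⟨h1, h2, h3, h4⟩ := hp
    by_cases hq : p.2 ≤ m
    · apply Finset.le_sup (f := fun p : Nat × Nat => p.2 - p.1)
      rw [pvMem_Bset]
      exact ⟨by omega, hq, h3, h4⟩
    · have hq2 : p.2 = m + 1 := by omega
      by_cases hp1 : p.1 = m + 1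
      · simp [hp1, hq2]
      · exact absurd (hq2 ▸ h4) (fun h => pvFirstOcc?_none array m _ hf p.1 (by omega) h)
  · exact Finset.sup_mono (pvBset_mono array m)

lemma pvBLoop_eq (array : List String) :
    ∀ (l : List String) (m : Nat) (d : PySem.Dict Int Int) (best : Int),
      l = array.drop m → m ≤ array.length → pvDictInv array m d →
      best = ((pvB array m : Nat) : Int) →
      pvBLoop l ((m : Int) + 1) d (pvBal array m) best = ((pvB array array.length : Nat) : Int) := by
  intro l
  induction l with
  | nil =>
    intro m d best hl hmn hinv hbest
    have hlen : array.length ≤ m := by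
      by_contra hc
      have := List.drop_eq_nil_iff.mp hl.symm
      omega
    have hmeq : m = array.length := by omega
    simp only [pvBLoop]
    rw [hbest, hmeq]
  | cons item rest ih =>
    intro m d best hl hmn hinv hbest
    have hm : m < array.length := by
      by_contra hc
      rw [List.drop_eq_nil_of_le (by omega)] at hl
      simp at hl
    have hd : array.drop m = array[m] :: array.drop (m + 1) := (List.getElem_cons_drop hm).symm
    rw [hd] at hl
    obtain ⟨hitem, hrest⟩ : item = array[m] ∧ rest = array.drop (m + 1) := by
      injection hl with a b; exact ⟨a, b⟩
    simp only [pvBLoop]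
    have hbal : pvBal array m + (if item = "1" then (1 : Int) else -1) = pvBal array (m + 1) := by
      rw [pvBal_succ array m hm, ← hitem]; rfl
    rw [hbal, hinv (pvBal array (m + 1))]
    have hj : ((m : Int) + 1) + 1 = ((m + 1 : Nat) : Int) + 1 := by push_cast; ring
    cases hfo : pvFirstOcc? array m (pvBal array (m + 1)) with
    | some k =>
      obtain ⟨hbalk, hkm, _⟩ := pvFirstOcc?_some array m _ k hfo
      have hinv2 : pvDictInv array (m + 1) d := by
        intro b
        rw [pvFirstOcc?_succ, hinv b]
        by_cases hb : pvBal array (m + 1) = b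
        · rw [← hb, hfo]
          rfl
        · rw [if_neg hb]
          cases pvFirstOcc? array m b <;> rfl
      have hcast : ((max (pvB array m) (m + 1 - k) : Nat) : Int)
          = max ((pvB array m : Nat) : Int) ((m : Int) + 1 - (k : Int)) := by
        rw [Nat.cast_max]; congr 1; omega
      have hbest' : (if (m : Int) + 1 - (k : Int) > best then (m : Int) + 1 - (k : Int) else best)
          = ((pvB array (m + 1) : Nat) : Int) := by
        rw [pvB_step_some array m k hfo, hcast, ← hbest]
        split_ifs with hgt
        · rw [max_eq_right (le_of_lt hgt)]
        · rw [max_eq_left (by omega)]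
      rw [hj]
      exact ih (m + 1) d _ hrest (by omega) hinv2 hbest'
    | none =>
      have hinv' : pvDictInv array (m + 1) (d.insert (pvBal array (m + 1)) ((m : Int) + 1)) := by
        intro b
        rw [PySem.Dict.get?_insert, pvFirstOcc?_succ]
        by_cases hb : b = pvBal array (m + 1)
        · subst hb
          rw [if_pos rfl, if_pos rfl, hfo]
          simp [Option.or]
        · rw [if_neg hb, if_neg (fun h => hb h.symm), hinv b]
          cases pvFirstOcc? array m b <;> rfl
      have hbest' : best = ((pvB array (m + 1) : Nat) : Int) := by
        rw [pvB_step_none array m hfo, ← hbest]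
      rw [hj]
      exact ih (m + 1) _ _ hrest (by omega) hinv' hbest'

lemma pvB_zero (array : List String) : pvB array 0 = 0 := by
  apply Nat.le_zero.mp
  apply Finset.sup_le
  intro p hp
  rw [pvMem_Bset] at hp
  omega

lemma pvA_char (array : List String) : solution_old array = ((pvG array 0 : Nat) : Int) := by
  unfold solution_old
  rw [pvALoop_eq array array.length 0 0 (by omega) le_rfl, max_eq_right (Int.natCast_nonneg _)]

lemma pvB_char (array : List String) :
    solution_old_alt array = ((pvB array array.length : Nat) : Int) := by
  unfold solution_old_alt
  have hinv : pvDictInv array 0 (PySem.Dict.ofList [((0 : Int), (0 : Int))]) := by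
    intro b
    unfold pvFirstOcc?
    by_cases hb : b = 0 <;>
      simp [hb, PySem.Dict.ofList, PySem.Dict.update, PySem.Dict.insert, PySem.Dict.get?,
        PySem.Dict.empty, PySem.Dict.contains, List.range_one,
        show pvBal array 0 = 0 from rfl]
    rw [if_neg (fun h => hb h.symm), if_neg (fun h => hb h.symm)]
    rfl
  have := pvBLoop_eq array array 0 (PySem.Dict.ofList [((0 : Int), (0 : Int))]) 0
    List.drop_zero.symm (by omega) hinv (by rw [pvB_zero]; rfl)
  simpa [show pvBal array 0 = 0 from rfl] using this

lemma pvG_eq_B (array : List String) : pvG array 0 = pvB array array.length := by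
  unfold pvG pvB
  congr 1
  ext p
  rw [pvMem_Gset, pvMem_Bset]
  constructor
  · rintro ⟨a, b, _, c, d⟩; exact ⟨a, b, c, d⟩
  · rintro ⟨a, b, c, d⟩; exact ⟨a, b, Nat.zero_le _, c, d⟩

-- ===== VERDICT (by name: the statement is the Claim_ definition above) =====
theorem solution_old_spec : Claim_equal_solution_old := by
  intro array _
  unfold Spec_solution_old
  rw [pvA_char, pvB_char, pvG_eq_B]
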